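-- pv_equiv track=rewrite | github.com/KrishnaVamsiGoli1998/TestCaseGenerator | backend/feedback_loop.py | _strip_python_imports
-- ===== SOURCE A (Python) =====
-- def _strip_python_imports(code: str, source_modules: set = None) -> str:
--     """
--     Remove pytest and source-module imports from LLM-generated test code.
--     Preserves stdlib/third-party imports (unittest.mock, types, os, etc.)
--     so LLM-generated module-level fixtures don't cause NameErrors.
--
--     source_modules: set of sanitized module names (e.g. {'user', 'order'}).
--     If None, falls back to stripping ALL imports (safe for single-file use).
--     """
--     lines = code.splitlines()
--     result = []
--     skip_until_close_paren = False
--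
--     for line in lines:
--         if skip_until_close_paren:
--             if ")" in line:
--                 skip_until_close_paren = False
--             continue
--
--         stripped = line.strip()
--
--         # Always remove pytest imports — the header adds them
--         if stripped.startswith("import pytest"):
--             if "(" in stripped and ")" not in stripped:
--                 skip_until_close_paren = True
--             continue
--
--         if source_modules is not None:
--             # Only strip imports of source modules; keep everything else
--             is_source_import = any(
--                 stripped.startswith(f"from {m} import") or stripped == f"import {m}"
--                 or stripped.startswith(f"import {m} ")
--                 for m in source_modules
--             )
--             if is_source_import:
--                 if "(" in stripped and ")" not in stripped:
--                     skip_until_close_paren = True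
--                 continue
--         else:
--             # Fallback: strip all imports (single-file path)
--             if (stripped.startswith("from ") and "import" in stripped) or stripped.startswith("import "):
--                 if "(" in stripped and ")" not in stripped:
--                     skip_until_close_paren = True
--                 continue
--
--         result.append(line)
--
--     return "\n".join(result).strip()
-- ===== SOURCE B (Python) =====
-- def _strip_python_imports(code: str, source_modules: set = None) -> str:
--     lines = code.splitlines()
--     n = len(lines)
--     # pass 1: next_close[j] = first index k >= j whose raw line contains ')', else n
--     next_close = [n] * (n + 1)
--     for j in range(n - 1, -1, -1):
--         next_close[j] = j if ")" in lines[j] else next_close[j + 1]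
--     # pass 2: collect the (inclusive) index spans of dropped import statements
--     spans = []
--     i = 0
--     while i < n:
--         s = lines[i].strip()
--         if _drops(s, source_modules):
--             if "(" in s and ")" not in s:
--                 end = next_close[i + 1]
--                 spans.append((i, min(end, n - 1)))
--                 i = end + 1
--             else:
--                 spans.append((i, i))
--                 i += 1
--         else:
--             i += 1
--     # pass 3: keep every line whose index is covered by no span
--     kept = [l for k, l in enumerate(lines)
--             if not any(a <= k <= b for a, b in spans)]
--     return "\n".join(kept).strip()
--
--
-- def _drops(s, source_modules):
--     if s.startswith("import pytest"):
--         return True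
--     if source_modules is None:
--         return (s.startswith("from ") and "import" in s) or s.startswith("import ")
--     return any(s.startswith("from %s import" % m) or s == "import %s" % m
--                or s.startswith("import %s " % m) for m in source_modules)
-- ===== Notes on version B (the rewrite author's own statement) =====
-- stated objective: alternative
-- what changed: Replaced A's single fold carrying a skip_until_close_paren flag by three staged passes: a backward pass precomputing a next-closing-paren index table, a span-collecting scan that jumps past multi-line imports in O(1) via that table (no inner consuming loop), and a final filter keeping each line whose index lies in no collected span.
import Mathlib
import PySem

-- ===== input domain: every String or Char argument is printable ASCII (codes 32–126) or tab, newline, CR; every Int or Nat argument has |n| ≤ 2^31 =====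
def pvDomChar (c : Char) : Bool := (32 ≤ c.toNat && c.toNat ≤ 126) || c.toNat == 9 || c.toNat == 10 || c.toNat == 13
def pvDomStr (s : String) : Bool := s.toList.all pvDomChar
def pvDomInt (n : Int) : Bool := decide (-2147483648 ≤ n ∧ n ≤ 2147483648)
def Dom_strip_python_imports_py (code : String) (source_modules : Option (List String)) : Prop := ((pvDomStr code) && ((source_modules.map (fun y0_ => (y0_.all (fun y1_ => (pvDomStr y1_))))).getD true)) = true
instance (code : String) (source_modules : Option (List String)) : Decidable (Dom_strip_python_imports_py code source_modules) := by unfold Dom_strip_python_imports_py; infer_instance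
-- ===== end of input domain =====

-- B replaces A's single skip-flag fold by three staged passes — a precomputed
-- next-closing-paren table, a span-collecting scan with O(1) jumps (no inner
-- consuming loop), and a filter of the lines by span membership (objective:
-- alternative; same asymptotic cost).


-- ===== PORT A =====

-- any(stripped.startswith(f"from {m} import") or stripped == f"import {m}" or stripped.startswith(f"import {m} ") for m in source_modules)
def pvA_isSourceImport (stripped : List Char) (mods : List String) : Bool :=
  mods.any (fun m =>
    PySem.Chars.startswith stripped ("from ".toList ++ m.toList ++ " import".toList)
    || stripped == ("import ".toList ++ m.toList)
    || PySem.Chars.startswith stripped ("import ".toList ++ m.toList ++ [' ']))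

-- one iteration of A's for-loop; state = (result, skip_until_close_paren)
def pvA_step (source_modules : Option (List String))
    (st : List (List Char) × Bool) (line : List Char) : List (List Char) × Bool :=
  if st.2 then
    (st.1, if PySem.Chars.isIn [')'] line then false else true)
  else
    let stripped := PySem.Chars.strip line
    if PySem.Chars.startswith stripped "import pytest".toList then
      (st.1, PySem.Chars.isIn ['('] stripped && !PySem.Chars.isIn [')'] stripped)
    else
      match source_modules with
      | some ms =>
        if pvA_isSourceImport stripped ms then
          (st.1, PySem.Chars.isIn ['('] stripped && !PySem.Chars.isIn [')'] stripped)
        else (st.1 ++ [line], st.2)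
      | none =>
        if (PySem.Chars.startswith stripped "from ".toList && PySem.Chars.isIn "import".toList stripped)
            || PySem.Chars.startswith stripped "import ".toList then
          (st.1, PySem.Chars.isIn ['('] stripped && !PySem.Chars.isIn [')'] stripped)
        else (st.1 ++ [line], st.2)

def strip_python_imports_py (code : String) (source_modules : Option (List String)) : String :=
  let lines := PySem.Chars.splitlines code.toList
  let result := (lines.foldl (pvA_step source_modules) ([], false)).1
  String.ofList (PySem.Chars.strip (PySem.Chars.join ['\n'] result))

-- ===== PORT B =====

-- helper _drops of Source B
def pvB_drops (source_modules : Option (List String)) (s : List Char) : Bool :=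
  if PySem.Chars.startswith s "import pytest".toList then true
  else
    match source_modules with
    | none =>
        (PySem.Chars.startswith s "from ".toList && PySem.Chars.isIn "import".toList s)
        || PySem.Chars.startswith s "import ".toList
    | some ms =>
        ms.any (fun m =>
          PySem.Chars.startswith s ("from ".toList ++ m.toList ++ " import".toList)
          || s == ("import ".toList ++ m.toList)
          || PySem.Chars.startswith s ("import ".toList ++ m.toList ++ [' ']))

-- pass 1: the backward loop filling next_close; entry j of the result is the first
-- index k ≥ j whose raw line contains ')' (length of the whole list if none)
def pvB_nc : List (List Char) → List Nat
  | [] => [0]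
  | l :: rest =>
    let t := (pvB_nc rest).map (· + 1)
    (if PySem.Chars.isIn [')'] l then 0 else t.getD 0 0) :: t

-- pass 2: the while loop collecting inclusive index spans of dropped lines;
-- fuel = lines.length makes the loop total (i strictly increases each iteration)
def pvB_spans (drops : List Char → Bool) (lines : List (List Char)) (nc : List Nat) :
    Nat → Nat → List (Nat × Nat)
  | 0, _ => []
  | fuel + 1, i =>
    if i < lines.length then
      let s := PySem.Chars.strip (lines.getD i [])
      if drops s then
        if PySem.Chars.isIn ['('] s && !PySem.Chars.isIn [')'] s then
          let e := nc.getD (i + 1) lines.length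
          (i, min e (lines.length - 1)) :: pvB_spans drops lines nc fuel (e + 1)
        else (i, i) :: pvB_spans drops lines nc fuel (i + 1)
      else pvB_spans drops lines nc fuel (i + 1)
    else []

-- pass 3: the comprehension over enumerate(lines), carrying the running index k
def pvB_filter (spans : List (Nat × Nat)) : Nat → List (List Char) → List (List Char)
  | _, [] => []
  | k, l :: rest =>
    if spans.any (fun ab => decide (ab.1 ≤ k) && decide (k ≤ ab.2)) then
      pvB_filter spans (k + 1) rest
    else l :: pvB_filter spans (k + 1) rest

def strip_python_imports_py_alt (code : String) (source_modules : Option (List String)) : String :=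
  let lines := PySem.Chars.splitlines code.toList
  let nc := pvB_nc lines
  let spans := pvB_spans (pvB_drops source_modules) lines nc lines.length 0
  let kept := pvB_filter spans 0 lines
  String.ofList (PySem.Chars.strip (PySem.Chars.join ['\n'] kept))

-- ===== PRECONDITION & SPEC =====
def Spec_strip_python_imports_py (code : String) (source_modules : Option (List String)) (out : String) : Prop := out = strip_python_imports_py_alt code source_modules
instance (code : String) (source_modules : Option (List String)) (out : String) : Decidable (Spec_strip_python_imports_py code source_modules out) := by unfold Spec_strip_python_imports_py; infer_instance

-- ===== CLAIM (what is proved, stated in full; the proofs are below) =====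
def Claim_equal_strip_python_imports_py : Prop := ∀ (code : String) (source_modules : Option (List String)), Dom_strip_python_imports_py code source_modules → Spec_strip_python_imports_py code source_modules (strip_python_imports_py code source_modules)

-- ===== LEMMAS AND PROOFS =====

-- intermediate description of the common behaviour: a structural scan that keeps
-- a line unless it is dropped, consuming the parenthesised continuation inline
def pvConsume : List (List Char) → List (List Char)
  | [] => []
  | l :: rest => if PySem.Chars.isIn [')'] l then rest else pvConsume rest

theorem pvConsume_length_le (ls : List (List Char)) : (pvConsume ls).length ≤ ls.length := by
  induction ls with
  | nil => simp [pvConsume]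
  | cons l rest ih =>
    simp only [pvConsume]
    split
    · simp
    · exact Nat.le_succ_of_le ih

def pvGo (drops : List Char → Bool) : List (List Char) → List (List Char)
  | [] => []
  | l :: rest =>
    let s := PySem.Chars.strip l
    if drops s then
      if PySem.Chars.isIn ['('] s && !PySem.Chars.isIn [')'] s then
        pvGo drops (pvConsume rest)
      else pvGo drops rest
    else l :: pvGo drops rest
termination_by ls => ls.length
decreasing_by
  · exact Nat.lt_succ_of_le (pvConsume_length_le rest)
  · simp
  · simp

-- index of the first line containing ')' (length if none)
def pvFirstClose : List (List Char) → Nat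
  | [] => 0
  | l :: rest => if PySem.Chars.isIn [')'] l then 0 else pvFirstClose rest + 1

theorem pvFirstClose_le (ls : List (List Char)) : pvFirstClose ls ≤ ls.length := by
  induction ls with
  | nil => simp [pvFirstClose]
  | cons l rest ih =>
    simp only [pvFirstClose]
    split
    · simp
    · simpa using ih

theorem pvConsume_eq_drop (ls : List (List Char)) :
    pvConsume ls = ls.drop (pvFirstClose ls + 1) := by
  induction ls with
  | nil => simp [pvConsume, pvFirstClose]
  | cons l rest ih =>
    simp only [pvConsume, pvFirstClose]
    split
    · simp
    · simpa using ih

-- ---- A's fold equals pvGo ----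

theorem pvA_step_eq (source_modules : Option (List String)) (acc : List (List Char)) (l : List Char) :
    pvA_step source_modules (acc, false) l
      = (if pvB_drops source_modules (PySem.Chars.strip l) then
          (acc, PySem.Chars.isIn ['('] (PySem.Chars.strip l)
                  && !PySem.Chars.isIn [')'] (PySem.Chars.strip l))
        else (acc ++ [l], false)) := by
  cases source_modules with
  | none =>
    simp only [pvA_step, pvB_drops]
    split_ifs <;> simp_all
  | some ms =>
    simp only [pvA_step, pvB_drops, pvA_isSourceImport]
    split_ifs <;> simp_all

theorem pvA_skip_eq_consume (source_modules : Option (List String)) :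
    ∀ (lines : List (List Char)) (acc : List (List Char)),
      lines.foldl (pvA_step source_modules) (acc, true)
        = (pvConsume lines).foldl (pvA_step source_modules) (acc, false)
        ∨ (lines.foldl (pvA_step source_modules) (acc, true) = (acc, true)
            ∧ pvConsume lines = []) := by
  intro lines
  induction lines with
  | nil => intro acc; right; exact ⟨rfl, rfl⟩
  | cons l rest ih =>
    intro acc
    simp only [List.foldl_cons, pvConsume]
    by_cases h : PySem.Chars.isIn [')'] l = true
    · left; simp [pvA_step, h]
    · have : pvA_step source_modules (acc, true) l = (acc, true) := by
        simp [pvA_step, h]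
      rw [this]
      simp only [h]
      exact ih acc

theorem pvA_fold_eq_go (source_modules : Option (List String)) :
    ∀ (n : Nat) (lines : List (List Char)), lines.length ≤ n →
      ∀ (acc : List (List Char)),
        (lines.foldl (pvA_step source_modules) (acc, false)).1
          = acc ++ pvGo (pvB_drops source_modules) lines := by
  intro n
  induction n with
  | zero =>
    intro lines hlen acc
    have : lines = [] := List.eq_nil_of_length_eq_zero (Nat.le_zero.mp hlen)
    subst this; simp [pvGo]
  | succ n ih =>
    intro lines hlen acc
    cases lines with
    | nil => simp [pvGo]
    | cons l rest =>
      have hrest : rest.length ≤ n := Nat.le_of_succ_le_succ hlen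
      simp only [List.foldl_cons, pvA_step_eq]
      by_cases hd : pvB_drops source_modules (PySem.Chars.strip l) = true
      · simp only [hd, if_true]
        by_cases hpar : (PySem.Chars.isIn ['('] (PySem.Chars.strip l)
            && !PySem.Chars.isIn [')'] (PySem.Chars.strip l)) = true
        · rw [hpar]
          have hgo : pvGo (pvB_drops source_modules) (l :: rest)
              = pvGo (pvB_drops source_modules) (pvConsume rest) := by
            rw [pvGo]; simp [hd, hpar]
          rw [hgo]
          rcases pvA_skip_eq_consume source_modules rest acc with h | ⟨h1, h2⟩
          · rw [h]
            exact ih (pvConsume rest)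
              (Nat.le_trans (pvConsume_length_le rest) hrest) acc
          · rw [h1, h2]; simp [pvGo]
        · rw [Bool.not_eq_true] at hpar
          rw [hpar]
          have hgo : pvGo (pvB_drops source_modules) (l :: rest)
              = pvGo (pvB_drops source_modules) rest := by
            rw [pvGo]; simp [hd, hpar]
          rw [hgo]
          exact ih rest hrest acc
      · rw [Bool.not_eq_true] at hd
        simp only [hd, Bool.false_eq_true, if_false]
        have hgo : pvGo (pvB_drops source_modules) (l :: rest)
            = l :: pvGo (pvB_drops source_modules) rest := by
          rw [pvGo]; simp [hd]
        rw [hgo, ih rest hrest (acc ++ [l]), List.append_assoc]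
        rfl

-- ---- properties of the next_close table ----

theorem pvB_nc_length (ls : List (List Char)) : (pvB_nc ls).length = ls.length + 1 := by
  induction ls with
  | nil => rfl
  | cons l rest ih => simp [pvB_nc, ih]

theorem getD_map_succ (l : List Nat) (j : Nat) (hj : j < l.length) (d d' : Nat) :
    (l.map (· + 1)).getD j d = l.getD j d' + 1 := by
  rw [List.getD_eq_getElem?_getD, List.getD_eq_getElem?_getD, List.getElem?_map,
      List.getElem?_eq_getElem hj]
  rfl

theorem pvB_nc_spec (ls : List (List Char)) :
    ∀ (j : Nat) (d : Nat), j ≤ ls.length →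
      (pvB_nc ls).getD j d = j + pvFirstClose (ls.drop j) := by
  induction ls with
  | nil =>
    intro j d hj
    have : j = 0 := Nat.le_zero.mp hj
    subst this
    simp [pvB_nc, pvFirstClose]
  | cons l rest ih =>
    intro j d hj
    cases j with
    | zero =>
      simp only [pvB_nc, List.getD_cons_zero, List.drop_zero, pvFirstClose, Nat.zero_add]
      split
      · rfl
      · rw [getD_map_succ _ 0 (by simp [pvB_nc_length]) 0 0, ih 0 0 (Nat.zero_le _)]
        simp
    | succ k =>
      have hk : k ≤ rest.length := Nat.le_of_succ_le_succ hj
      simp only [pvB_nc, List.getD_cons_succ, List.drop_succ_cons]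
      rw [getD_map_succ _ k (by rw [pvB_nc_length]; omega) d 0, ih k 0 hk]
      omega

-- every span produced from start index i begins at or after i
theorem pvB_spans_start (drops : List Char → Bool) (lines : List (List Char)) :
    ∀ (fuel i : Nat) (ab : Nat × Nat),
      ab ∈ pvB_spans drops lines (pvB_nc lines) fuel i → i ≤ ab.1 := by
  intro fuel
  induction fuel with
  | zero => intro i ab h; simp [pvB_spans] at h
  | succ fuel ih =>
    intro i ab h
    simp only [pvB_spans] at h
    split_ifs at h with h1 h2 h3
    · rcases List.mem_cons.mp h with rfl | h
      · rfl
      · have he : (pvB_nc lines).getD (i + 1) lines.length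
            = i + 1 + pvFirstClose (lines.drop (i + 1)) :=
          pvB_nc_spec lines (i + 1) lines.length h1
        have := ih _ ab h
        omega
    · rcases List.mem_cons.mp h with rfl | h
      · rfl
      · exact Nat.le_of_succ_le (ih _ ab h)
    · exact Nat.le_of_succ_le (ih _ ab h)
    · simp at h

-- filtering ignores a span that ends before every remaining index
theorem pvB_filter_head_skip (a b : Nat) (spans : List (Nat × Nat)) :
    ∀ (xs : List (List Char)) (k : Nat), b < k →
      pvB_filter ((a, b) :: spans) k xs = pvB_filter spans k xs := by
  intro xs
  induction xs with
  | nil => intro k _; rfl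
  | cons l rest ih =>
    intro k hk
    simp only [pvB_filter, List.any_cons]
    have h1 : (decide (a ≤ k) && decide (k ≤ b)) = false := by
      simp; omega
    simp only [h1, Bool.false_or, ih (k + 1) (Nat.lt_succ_of_lt hk)]

-- dropping a block: indices k .. k+|xs|-1 are all covered by the head span
theorem pvB_filter_block_dropped (a b : Nat) (spans : List (Nat × Nat)) :
    ∀ (xs ys : List (List Char)) (k : Nat), a ≤ k → k + xs.length ≤ b + 1 →
      pvB_filter ((a, b) :: spans) k (xs ++ ys)
        = pvB_filter ((a, b) :: spans) (k + xs.length) ys := by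
  intro xs
  induction xs with
  | nil => intro ys k _ _; simp
  | cons l rest ih =>
    intro ys k ha hb
    simp only [List.cons_append, pvB_filter, List.any_cons]
    have h1 : (decide (a ≤ k) && decide (k ≤ b)) = true := by
      simp only [List.length_cons] at hb
      simp; omega
    simp only [h1, Bool.true_or, if_true]
    rw [ih ys (k + 1) (Nat.le_succ_of_le ha) (by simp only [List.length_cons] at hb; omega)]
    congr 1
    simp [Nat.add_comm, Nat.add_left_comm]

-- ---- B's three passes equal pvGo ----

theorem pvGo_nil (drops : List Char → Bool) : pvGo drops [] = [] := by
  rw [pvGo]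

theorem pvB_passes_eq_go (drops : List Char → Bool) (lines : List (List Char)) :
    ∀ (fuel i : Nat), lines.length ≤ fuel + i →
      pvB_filter (pvB_spans drops lines (pvB_nc lines) fuel i) i (lines.drop i)
        = pvGo drops (lines.drop i) := by
  intro fuel
  induction fuel with
  | zero =>
    intro i hi
    rw [List.drop_eq_nil_of_le (by omega)]
    simp [pvB_filter, pvGo_nil]
  | succ fuel ih =>
    intro i hi
    by_cases hin : i < lines.length
    · obtain ⟨l0, hl0⟩ : ∃ l0, lines.getD i [] = l0 := ⟨_, rfl⟩
      have hdrop : lines.drop i = l0 :: lines.drop (i + 1) := by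
        rw [← hl0, List.getD_eq_getElem _ _ hin, ← List.getElem_cons_drop]
      obtain ⟨s, hs⟩ : ∃ s, PySem.Chars.strip l0 = s := ⟨_, rfl⟩
      have hgo_cons : pvGo drops (l0 :: lines.drop (i + 1))
          = if drops s then
              (if PySem.Chars.isIn ['('] s && !PySem.Chars.isIn [')'] s then
                pvGo drops (pvConsume (lines.drop (i + 1)))
              else pvGo drops (lines.drop (i + 1)))
            else l0 :: pvGo drops (lines.drop (i + 1)) := by
        rw [pvGo]
        simp only [hs]
      rw [pvB_spans]
      simp only [hin, if_true, hl0, hs]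
      rw [hdrop, hgo_cons]
      by_cases hd : drops s = true
      · simp only [hd, if_true]
        by_cases hpar : (PySem.Chars.isIn ['('] s && !PySem.Chars.isIn [')'] s) = true
        · simp only [hpar, if_true]
          obtain ⟨e, he⟩ : ∃ e, (pvB_nc lines).getD (i + 1) lines.length = e := ⟨_, rfl⟩
          rw [he]
          have heD : e = i + 1 + pvFirstClose (lines.drop (i + 1)) :=
            he.symm.trans (pvB_nc_spec lines (i + 1) lines.length hin)
          have hfc : pvFirstClose (lines.drop (i + 1)) ≤ lines.length - (i + 1) := by
            have := pvFirstClose_le (lines.drop (i + 1))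
            simpa using this
          have hgo2 : pvGo drops (pvConsume (lines.drop (i + 1)))
              = pvGo drops (lines.drop (e + 1)) := by
            rw [pvConsume_eq_drop, List.drop_drop]
            congr 2
            omega
          rw [hgo2]
          have hsplit : l0 :: lines.drop (i + 1)
              = (l0 :: lines.drop (i + 1)).take (e + 1 - i) ++ lines.drop (e + 1) := by
            conv_lhs => rw [← List.take_append_drop (e + 1 - i) (l0 :: lines.drop (i + 1))]
            congr 1
            rw [← hdrop, List.drop_drop]
            congr 1
            omega
          have hxslen : ((l0 :: lines.drop (i + 1)).take (e + 1 - i)).length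
              = min (e + 1 - i) (lines.length - i) := by
            rw [← hdrop]
            simp [List.length_take]
          rw [hsplit,
            pvB_filter_block_dropped i (min e (lines.length - 1)) _ _ _ i (Nat.le_refl i)
              (by rw [hxslen]; omega),
            hxslen]
          by_cases hcase : e + 1 ≤ lines.length
          · have hk : i + min (e + 1 - i) (lines.length - i) = e + 1 := by omega
            rw [hk, pvB_filter_head_skip _ _ _ _ _ (by omega)]
            exact ih (e + 1) (by omega)
          · have hnil : lines.drop (e + 1) = [] := List.drop_eq_nil_of_le (by omega)
            rw [hnil]
            simp [pvB_filter, pvGo_nil]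
        · rw [Bool.not_eq_true] at hpar
          simp only [hpar, Bool.false_eq_true, if_false]
          have h1 : (decide (i ≤ i) && decide (i ≤ i)) = true := by simp
          simp only [pvB_filter, List.any_cons, h1, Bool.true_or, if_true]
          rw [pvB_filter_head_skip _ _ _ _ _ (Nat.lt_succ_self i)]
          exact ih (i + 1) (by omega)
      · rw [Bool.not_eq_true] at hd
        simp only [hd, Bool.false_eq_true, if_false]
        simp only [pvB_filter]
        have hany : ((pvB_spans drops lines (pvB_nc lines) fuel (i + 1)).any
            (fun ab => decide (ab.1 ≤ i) && decide (i ≤ ab.2))) = false := by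
          rw [List.any_eq_false]
          intro ab hab
          have := pvB_spans_start drops lines fuel (i + 1) ab hab
          simp
          omega
        simp only [hany, Bool.false_eq_true, if_false]
        rw [ih (i + 1) (by omega)]
    · rw [List.drop_eq_nil_of_le (by omega), pvB_spans]
      simp only [hin, if_false]
      simp [pvB_filter, pvGo_nil]

-- ===== VERDICT (by name: the statement is the Claim_ definition above) =====
theorem strip_python_imports_py_spec : Claim_equal_strip_python_imports_py := by
  intro code source_modules _
  show strip_python_imports_py code source_modules = strip_python_imports_py_alt code source_modules
  simp only [strip_python_imports_py, strip_python_imports_py_alt]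
  rw [pvA_fold_eq_go source_modules (PySem.Chars.splitlines code.toList).length
      (PySem.Chars.splitlines code.toList) (Nat.le_refl _) []]
  have h := pvB_passes_eq_go (pvB_drops source_modules) (PySem.Chars.splitlines code.toList)
    (PySem.Chars.splitlines code.toList).length 0 (by omega)
  simp only [List.drop_zero] at h
  rw [← h, List.nil_append]
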